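-- pv_equiv track=rewrite | github.com/s-ilya/yandex-praktikum-algorithms | three_days_stats.py | three_days_stats
-- ===== SOURCE A (Python) =====
-- from typing import List
--
-- def three_days_stats(stats: List[int]) -> int:
--     max_multiplication = -1
--
--     for first_index in range(0, len(stats)):
--         for second_index in range(first_index, len(stats)):
--             for third_index in range(second_index, len(stats)):
--                 first_value = stats[first_index]
--                 second_value = stats[second_index]
--                 third_value = stats[third_index]
--
--                 if (first_value + second_value + third_value) == 0:
--                     new_max = first_value * second_value * third_value
--                     if new_max > max_multiplication and new_max > 0:
--                         max_multiplication = new_max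
--
--     return max_multiplication
-- ===== SOURCE B (Python) =====
-- from typing import List
--
-- def three_days_stats(stats: List[int]) -> int:
--     values = set(stats)
--     best = -1
--     for a in values:
--         for b in values:
--             c = -(a + b)
--             if c in values:
--                 p = a * b * c
--                 if p > 0 and p > best:
--                     best = p
--     return best
-- ===== Notes on version B (the rewrite author's own statement) =====
-- stated objective: faster
-- what changed: Replaces the O(n^3) triple nested index scan with an O(m^2) double loop over the distinct values plus an O(1) hash-set membership test for the third value (m = number of distinct values); correctness relies on the product/sum being symmetric and index repetition being value-irrelevant.
import Mathlib
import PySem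

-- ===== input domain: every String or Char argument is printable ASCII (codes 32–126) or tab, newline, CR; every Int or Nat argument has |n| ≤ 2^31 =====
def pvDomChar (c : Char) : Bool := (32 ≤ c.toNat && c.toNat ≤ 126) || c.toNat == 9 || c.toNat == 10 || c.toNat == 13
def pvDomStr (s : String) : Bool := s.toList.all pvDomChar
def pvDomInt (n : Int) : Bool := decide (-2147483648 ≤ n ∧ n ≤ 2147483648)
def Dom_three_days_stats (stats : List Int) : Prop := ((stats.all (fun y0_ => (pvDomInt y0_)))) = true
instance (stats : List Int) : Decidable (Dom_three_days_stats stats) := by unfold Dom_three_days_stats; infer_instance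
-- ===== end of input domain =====

-- B replaces A's O(n^3) triple index scan by an O(m^2) pair loop over the distinct values
-- with a set-membership test for the third value (same result: max is symmetric and repetition-insensitive).

-- ===== PORT A =====
-- indices produced by the ranges are always within bounds, so stats[i] never raises; pyGetD's default is never read
def three_days_stats (stats : List Int) : Int :=
  (PySem.List.pyRange 0 (PySem.List.len stats) 1).foldl (fun acc first_index =>
    (PySem.List.pyRange first_index (PySem.List.len stats) 1).foldl (fun acc second_index =>
      (PySem.List.pyRange second_index (PySem.List.len stats) 1).foldl (fun acc third_index =>
        let first_value := PySem.List.pyGetD stats first_index 0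
        let second_value := PySem.List.pyGetD stats second_index 0
        let third_value := PySem.List.pyGetD stats third_index 0
        if first_value + second_value + third_value = 0 then
          let new_max := first_value * second_value * third_value
          if new_max > acc ∧ new_max > 0 then new_max else acc
        else acc) acc) acc) (-1)

-- ===== PORT B =====
def three_days_stats_alt (stats : List Int) : Int :=
  let values : PySem.Set Int := PySem.Set.ofList stats
  values.foldl (fun best a =>
    values.foldl (fun best b =>
      let c := -(a + b)
      if PySem.Set.contains values c then
        let p := a * b * c
        if p > 0 ∧ p > best then p else best
      else best) best) (-1)

-- ===== PRECONDITION & SPEC =====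
def Spec_three_days_stats (stats : List Int) (out : Int) : Prop := out = three_days_stats_alt stats
instance (stats : List Int) (out : Int) : Decidable (Spec_three_days_stats stats out) := by unfold Spec_three_days_stats; infer_instance

-- ===== CLAIM (what is proved, stated in full; the proofs are below) =====
def Claim_equal_three_days_stats : Prop := ∀ (stats : List Int), Dom_three_days_stats stats → Spec_three_days_stats stats (three_days_stats stats)

-- ===== LEMMAS AND PROOFS =====

-- a value is a "candidate": a positive product of three (not necessarily distinct) entries summing to zero
def pvCand (stats : List Int) (x : Int) : Prop :=
  ∃ a ∈ stats, ∃ b ∈ stats, ∃ c ∈ stats, a + b + c = 0 ∧ 0 < x ∧ x = a * b * c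

-- generic fold facts for max-accumulating steps
theorem pvFold_reach {γ : Type} (P : Int → Prop) (S : Int → γ → Int) :
    ∀ (L : List γ), (∀ acc t, t ∈ L → S acc t = acc ∨ P (S acc t)) →
      ∀ a, L.foldl S a = a ∨ P (L.foldl S a) := by
  intro L
  induction L with
  | nil => intro _ a; left; rfl
  | cons t L ih =>
    intro h a
    have h1 := h a t (by simp)
    have h2 := ih (fun acc u hu => h acc u (by simp [hu])) (S a t)
    simp only [List.foldl_cons]
    rcases h2 with h2 | h2
    · rw [h2]; exact h1
    · right; exact h2

theorem pvFold_lb {γ : Type} (S : Int → γ → Int) (hmono : ∀ acc t, acc ≤ S acc t) :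
    ∀ (L : List γ) (a : Int), a ≤ L.foldl S a := by
  intro L
  induction L with
  | nil => intro a; simp
  | cons t L ih => intro a; exact le_trans (hmono a t) (ih (S a t))

theorem pvFold_le {γ : Type} (S : Int → γ → Int) (hmono : ∀ acc t, acc ≤ S acc t)
    (x : Int) : ∀ (L : List γ) (a : Int) (t : γ), t ∈ L → (∀ acc, x ≤ S acc t) →
      x ≤ L.foldl S a := by
  intro L
  induction L with
  | nil => intro a t ht; exact absurd ht (by simp)
  | cons u L ih =>
    intro a t ht hx
    simp only [List.mem_cons] at ht
    rcases ht with rfl | ht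
    · exact le_trans (hx a) (pvFold_lb S hmono L (S a t))
    · exact ih (S a u) t ht hx

-- ----- A side -----

theorem pvA_body_mono (stats : List Int) :
    ∀ (i j : Int) (acc k : Int),
      acc ≤ (if PySem.List.pyGetD stats i 0 + PySem.List.pyGetD stats j 0 + PySem.List.pyGetD stats k 0 = 0 then
               let new_max := PySem.List.pyGetD stats i 0 * PySem.List.pyGetD stats j 0 * PySem.List.pyGetD stats k 0
               if new_max > acc ∧ new_max > 0 then new_max else acc
             else acc) := by
  intro i j acc k
  dsimp only
  split_ifs with h1 h2 <;> omega

theorem pvA_mono (stats : List Int) : ∀ acc i,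
    acc ≤ (PySem.List.pyRange i (PySem.List.len stats) 1).foldl (fun acc j =>
      (PySem.List.pyRange j (PySem.List.len stats) 1).foldl (fun acc k =>
        if PySem.List.pyGetD stats i 0 + PySem.List.pyGetD stats j 0 + PySem.List.pyGetD stats k 0 = 0 then
          let new_max := PySem.List.pyGetD stats i 0 * PySem.List.pyGetD stats j 0 * PySem.List.pyGetD stats k 0
          if new_max > acc ∧ new_max > 0 then new_max else acc
        else acc) acc) acc := by
  intro acc i
  apply pvFold_lb
  intro acc' j
  apply pvFold_lb
  intro acc'' k
  exact pvA_body_mono stats i j acc'' k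

theorem pvA_reach (stats : List Int) :
    three_days_stats stats = -1 ∨ pvCand stats (three_days_stats stats) := by
  unfold three_days_stats
  apply pvFold_reach (pvCand stats)
  intro acc i hi
  apply pvFold_reach (pvCand stats)
  intro acc' j hj
  apply pvFold_reach (pvCand stats)
  intro acc'' k hk
  rw [PySem.List.mem_pyRange_one] at hi hj hk
  simp only [PySem.List.len_eq] at hi hj hk
  dsimp only
  split_ifs with h1 h2
  · right
    have hi' : (0:Int) ≤ i ∧ i < (stats.length : Int) := ⟨hi.1, by omega⟩
    have hj' : (0:Int) ≤ j ∧ j < (stats.length : Int) := ⟨by omega, by omega⟩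
    have hk' : (0:Int) ≤ k ∧ k < (stats.length : Int) := ⟨by omega, hk.2⟩
    have ma : PySem.List.pyGetD stats i 0 ∈ stats := by
      rw [PySem.List.pyGetD_eq_getElem stats 0 hi'.1 hi'.2]; exact List.getElem_mem _
    have mb : PySem.List.pyGetD stats j 0 ∈ stats := by
      rw [PySem.List.pyGetD_eq_getElem stats 0 hj'.1 hj'.2]; exact List.getElem_mem _
    have mc : PySem.List.pyGetD stats k 0 ∈ stats := by
      rw [PySem.List.pyGetD_eq_getElem stats 0 hk'.1 hk'.2]; exact List.getElem_mem _
    exact ⟨_, ma, _, mb, _, mc, h1, h2.2, rfl⟩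
  · left; rfl
  · left; rfl

-- upper-bound core for A: any candidate realised at sorted positions p ≤ q ≤ r is ≤ A's result
theorem pvA_ub_core (stats : List Int) (x : Int) (p q r : Nat)
    (hpq : p ≤ q) (hqr : q ≤ r) (hr : r < stats.length)
    (hsum : stats.getD p 0 + stats.getD q 0 + stats.getD r 0 = 0)
    (hpos : 0 < x)
    (hx : x = stats.getD p 0 * stats.getD q 0 * stats.getD r 0) :
    x ≤ three_days_stats stats := by
  unfold three_days_stats
  apply pvFold_le _ (by intro acc i; exact pvA_mono stats acc i) x _ _ ((p : Nat) : Int)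
  · rw [PySem.List.mem_pyRange_one]
    simp only [PySem.List.len_eq]
    constructor
    · exact Int.natCast_nonneg p
    · exact_mod_cast lt_of_le_of_lt (le_trans hpq hqr) hr
  · intro acc
    apply pvFold_le _ (by intro acc' j; apply pvFold_lb; intro a k; exact pvA_body_mono stats _ j a k) x _ _ ((q : Nat) : Int)
    · rw [PySem.List.mem_pyRange_one]
      simp only [PySem.List.len_eq]
      constructor
      · exact_mod_cast hpq
      · exact_mod_cast lt_of_le_of_lt hqr hr
    · intro acc'
      apply pvFold_le _ (by intro a k; exact pvA_body_mono stats _ _ a k) x _ _ ((r : Nat) : Int)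
      · rw [PySem.List.mem_pyRange_one]
        simp only [PySem.List.len_eq]
        exact ⟨by exact_mod_cast hqr, by exact_mod_cast hr⟩
      · intro a
        simp only [PySem.List.pyGetD_natCast]
        rw [if_pos hsum, ← hx]
        split_ifs with h <;> omega

theorem pvA_ub (stats : List Int) (x : Int) (hx : pvCand stats x) :
    x ≤ three_days_stats stats := by
  obtain ⟨a, ha, b, hb, c, hc, hsum, hpos, hprod⟩ := hx
  obtain ⟨p, hp, rfl⟩ := List.mem_iff_getElem.mp ha
  obtain ⟨q, hq, rfl⟩ := List.mem_iff_getElem.mp hb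
  obtain ⟨r, hr, rfl⟩ := List.mem_iff_getElem.mp hc
  have ep : stats[p] = stats.getD p 0 := (List.getD_eq_getElem stats 0 hp).symm
  have eq' : stats[q] = stats.getD q 0 := (List.getD_eq_getElem stats 0 hq).symm
  have er : stats[r] = stats.getD r 0 := (List.getD_eq_getElem stats 0 hr).symm
  rw [ep, eq', er] at hsum hprod
  rcases le_total p q with h1 | h1 <;> rcases le_total q r with h2 | h2 <;>
    rcases le_total p r with h3 | h3
  · exact pvA_ub_core stats x p q r h1 h2 hr hsum hpos hprod
  · exact pvA_ub_core stats x p q r h1 h2 hr hsum hpos hprod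
  · exact pvA_ub_core stats x p r q h3 h2 hq (by linarith) hpos (by rw [hprod]; ring)
  · exact pvA_ub_core stats x r p q h3 h1 hq (by linarith) hpos (by rw [hprod]; ring)
  · exact pvA_ub_core stats x q p r h1 h3 hr (by linarith) hpos (by rw [hprod]; ring)
  · have : q ≤ p := h1
    exact pvA_ub_core stats x q r p h2 h3 hp (by linarith) hpos (by rw [hprod]; ring)
  · exact pvA_ub_core stats x q p r h1 h3 hr (by linarith) hpos (by rw [hprod]; ring)
  · exact pvA_ub_core stats x r q p h2 h1 hp (by linarith) hpos (by rw [hprod]; ring)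

-- ----- B side -----

theorem pvB_body_mono (stats : List Int) : ∀ (a : Int) (best b : Int),
    best ≤ (if PySem.Set.contains (PySem.Set.ofList stats) (-(a + b)) then
              let p := a * b * (-(a + b))
              if p > 0 ∧ p > best then p else best
            else best) := by
  intro a best b
  dsimp only
  split_ifs with h1 h2 <;> omega

theorem pvB_reach (stats : List Int) :
    three_days_stats_alt stats = -1 ∨ pvCand stats (three_days_stats_alt stats) := by
  unfold three_days_stats_alt
  apply pvFold_reach (pvCand stats)
  intro best a ha
  apply pvFold_reach (pvCand stats)
  intro best' b hb
  dsimp only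
  split_ifs with h1 h2
  · right
    rw [PySem.Set.contains_iff, PySem.Set.mem_ofList] at h1
    rw [PySem.Set.mem_ofList] at ha hb
    exact ⟨a, ha, b, hb, -(a + b), h1, by ring, h2.1, rfl⟩
  · left; rfl
  · left; rfl

theorem pvB_ub (stats : List Int) (x : Int) (hx : pvCand stats x) :
    x ≤ three_days_stats_alt stats := by
  obtain ⟨a, ha, b, hb, c, hc, hsum, hpos, hprod⟩ := hx
  have hc' : c = -(a + b) := by omega
  unfold three_days_stats_alt
  apply pvFold_le _ ?mono x _ _ a ((PySem.Set.mem_ofList stats a).mpr ha)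
  case mono =>
    intro acc t
    apply pvFold_lb
    intro best b'
    exact pvB_body_mono stats t best b'
  intro acc
  apply pvFold_le _ (by intro best b'; exact pvB_body_mono stats a best b') x _ _ b
    ((PySem.Set.mem_ofList stats b).mpr hb)
  intro best
  have hmem : PySem.Set.contains (PySem.Set.ofList stats) (-(a + b)) = true := by
    rw [PySem.Set.contains_iff, PySem.Set.mem_ofList, ← hc']; exact hc
  dsimp only
  rw [if_pos hmem]
  have hxp : x = a * b * (-(a + b)) := by rw [hprod, hc']
  rw [← hxp]
  split_ifs with h <;> omega

-- ===== VERDICT (by name: the statement is the Claim_ definition above) =====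
theorem three_days_stats_spec : Claim_equal_three_days_stats := by
  intro stats _
  unfold Spec_three_days_stats
  have hA := pvA_reach stats
  have hB := pvB_reach stats
  rcases hA with hA | hA <;> rcases hB with hB | hB
  · rw [hA, hB]
  · have := pvA_ub stats _ hB
    obtain ⟨_, _, _, _, _, _, _, hpos, _⟩ := hB
    omega
  · have := pvB_ub stats _ hA
    obtain ⟨_, _, _, _, _, _, _, hpos, _⟩ := hA
    omega
  · exact le_antisymm (pvB_ub stats _ hA) (pvA_ub stats _ hB)
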